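-- pv_equiv track=rewrite | github.com/MengSunDom/CITS5206 | backend/game/bridge_auction_validator.py | create_auction_grid
-- ===== SOURCE A (Python) =====
-- from typing import Dict, List, Optional, Tuple
--
-- def create_auction_grid(dealer_seat: str, history: List[Dict]) -> List[List[Optional[Dict]]]:
--     """Create a properly formatted auction grid with dealer offset
--
--     Args:
--         dealer_seat: The dealer position (W, N, E, S)
--         history: List of calls in chronological order
--
--     Returns:
--         2D grid with rows and columns for W-N-E-S layout
--     """
--     cols = ['W', 'N', 'E', 'S']
--     start_col = cols.index(dealer_seat)
--
--     # Calculate number of rows needed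
--     total_calls = len(history)
--     num_rows = max(1, (start_col + total_calls + 3) // 4)
--
--     # Initialize grid
--     grid = []
--     for _ in range(num_rows):
--         grid.append([None, None, None, None])
--
--     # Place each call in the grid
--     for i, call in enumerate(history):
--         abs_index = start_col + i
--         row = abs_index // 4
--         col = abs_index % 4
--         if row < len(grid):
--             grid[row][col] = call
--
--     return grid
-- ===== SOURCE B (Python) =====
-- from typing import Dict, List, Optional
--
--
-- def create_auction_grid(dealer_seat: str, history: List[Dict]) -> List[List[Optional[Dict]]]:
--     """Create a properly formatted auction grid with dealer offset.
--
--     Flat-list decomposition: pad the history with dealer-offset Nones,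
--     then chunk the flat list into rows of four.
--     """
--     cols = ['W', 'N', 'E', 'S']
--     start_col = cols.index(dealer_seat)
--
--     padded = [None] * start_col + list(history)
--     num_rows = max(1, (len(padded) + 3) // 4)
--
--     grid = []
--     for r in range(num_rows):
--         chunk = padded[r * 4: r * 4 + 4]
--         grid.append(chunk + [None] * (4 - len(chunk)))
--     return grid
-- ===== Notes on version B (the rewrite author's own statement) =====
-- stated objective: simpler
-- what changed: Instead of pre-allocating a None grid and writing each call into it by computed (row, col) coordinates, B builds one flat None-padded list and chunks it into rows of four by slicing, so the index arithmetic and in-place mutation disappear.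
import Mathlib
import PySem

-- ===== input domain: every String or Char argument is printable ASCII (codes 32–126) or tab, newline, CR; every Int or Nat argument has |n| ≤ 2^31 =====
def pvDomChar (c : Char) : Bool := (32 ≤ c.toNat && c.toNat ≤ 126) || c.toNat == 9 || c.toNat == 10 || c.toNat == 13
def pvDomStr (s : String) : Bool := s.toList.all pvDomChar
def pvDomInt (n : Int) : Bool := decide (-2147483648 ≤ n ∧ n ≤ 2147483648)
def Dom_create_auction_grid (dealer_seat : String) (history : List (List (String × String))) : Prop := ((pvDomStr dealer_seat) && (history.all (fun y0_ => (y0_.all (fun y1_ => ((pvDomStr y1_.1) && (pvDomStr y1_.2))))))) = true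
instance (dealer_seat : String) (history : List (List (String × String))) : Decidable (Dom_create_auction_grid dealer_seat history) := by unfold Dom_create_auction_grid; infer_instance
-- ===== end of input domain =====

-- B replaces A's coordinate-wise writes into a pre-allocated None grid by chunking one flat
-- None-padded list into rows of four (simpler decomposition, same cost).


-- ===== PORT A =====
-- the 'for i, call in enumerate(history)' placement loop of A
def pvPlaceA (start_col : Nat) (i : Nat) (hs : List (List (String × String)))
    (g : List (List (Option (List (String × String))))) : List (List (Option (List (String × String)))) :=
  match hs with
  | [] => g
  | call :: rest =>
    let abs_index := start_col + i
    let row := abs_index / 4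
    let col := abs_index % 4
    pvPlaceA start_col (i + 1) rest
      (if row < g.length then g.modify row (fun r => r.set col (some call)) else g)

def pvGridA (start_col : Nat) (history : List (List (String × String))) :
    List (List (Option (List (String × String)))) :=
  let total_calls := history.length
  let num_rows := max 1 ((start_col + total_calls + 3) / 4)
  let grid := (List.range num_rows).foldl (fun g _ => g ++ [[none, none, none, none]]) []
  pvPlaceA start_col 0 history grid

def create_auction_grid (dealer_seat : String) (history : List (List (String × String))) :
    List (List (Option (List (String × String)))) :=
  match PySem.List.index? ["W", "N", "E", "S"] dealer_seat with
  | some start_col => pvGridA start_col history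
  | none => []  -- ValueError: excluded by Pre_

-- ===== PORT B =====
def pvRowB (padded : List (Option (List (String × String)))) (r : Nat) :
    List (Option (List (String × String))) :=
  let chunk := PySem.List.slice padded (some ((r * 4 : Nat) : Int)) (some ((r * 4 + 4 : Nat) : Int))
  chunk ++ List.replicate (4 - chunk.length) none

def pvGridB (start_col : Nat) (history : List (List (String × String))) :
    List (List (Option (List (String × String)))) :=
  let padded := List.replicate start_col (none : Option (List (String × String))) ++ history.map some
  let num_rows := max 1 ((padded.length + 3) / 4)
  (List.range num_rows).foldl (fun g r => g ++ [pvRowB padded r]) []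

def create_auction_grid_alt (dealer_seat : String) (history : List (List (String × String))) :
    List (List (Option (List (String × String)))) :=
  match PySem.List.index? ["W", "N", "E", "S"] dealer_seat with
  | some start_col => pvGridB start_col history
  | none => []  -- ValueError: excluded by Pre_

-- ===== PRECONDITION & SPEC =====
-- Pre_ excludes exactly the dealer seats not among W/N/E/S, on which A raises ValueError.
def Pre_create_auction_grid (dealer_seat : String) (_history : List (List (String × String))) : Prop :=
  dealer_seat ∈ (["W", "N", "E", "S"] : List String)
instance (dealer_seat : String) (history : List (List (String × String))) : Decidable (Pre_create_auction_grid dealer_seat history) := by unfold Pre_create_auction_grid; infer_instance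

def pvWitness_create_auction_grid : String × (List (List (String × String))) :=
  ("N", [[("type", "bid"), ("bid", "1H")], [("type", "pass")]])

def Spec_create_auction_grid (dealer_seat : String) (history : List (List (String × String))) (out : List (List (Option (List (String × String))))) : Prop := out = create_auction_grid_alt dealer_seat history
instance (dealer_seat : String) (history : List (List (String × String))) (out : List (List (Option (List (String × String))))) : Decidable (Spec_create_auction_grid dealer_seat history out) := by unfold Spec_create_auction_grid; infer_instance

-- ===== CLAIM (what is proved, stated in full; the proofs are below) =====
def Claim_equal_create_auction_grid : Prop := ∀ (dealer_seat : String) (history : List (List (String × String))), Dom_create_auction_grid dealer_seat history → Pre_create_auction_grid dealer_seat history → Spec_create_auction_grid dealer_seat history (create_auction_grid dealer_seat history)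

-- ===== LEMMAS AND PROOFS =====

-- the entry of a grid at flat index j (row j/4, column j%4), none when absent
def pvEntry (g : List (List (Option (List (String × String))))) (j : Nat) :
    Option (List (String × String)) :=
  (g.getD (j / 4) []).getD (j % 4) none

lemma pvPlaceA_length (hs : List (List (String × String))) :
    ∀ (s i : Nat) (g : List (List (Option (List (String × String))))),
      (pvPlaceA s i hs g).length = g.length := by
  induction hs with
  | nil => intro s i g; rfl
  | cons call rest ih =>
    intro s i g
    rw [pvPlaceA, ih]
    split <;> simp

lemma rows4_step (g : List (List (Option (List (String × String)))))
    (hg : ∀ r ∈ g, r.length = 4) (a : Nat) (v : List (String × String)) :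
    ∀ r ∈ (if a / 4 < g.length then g.modify (a / 4) (fun r => r.set (a % 4) (some v)) else g),
      r.length = 4 := by
  split
  · intro r hr
    rw [List.mem_iff_getElem] at hr
    obtain ⟨k, hk, rfl⟩ := hr
    rw [List.length_modify] at hk
    rw [List.getElem_modify]
    split
    · simpa using hg _ (List.getElem_mem hk)
    · exact hg _ (List.getElem_mem hk)
  · exact hg

lemma len_step (g : List (List (Option (List (String × String))))) (a : Nat)
    (v : List (String × String)) :
    (if a / 4 < g.length then g.modify (a / 4) (fun r => r.set (a % 4) (some v)) else g).length
      = g.length := by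
  split <;> simp

lemma pvPlaceA_rows4 (hs : List (List (String × String))) :
    ∀ (s i : Nat) (g : List (List (Option (List (String × String))))),
      (∀ r ∈ g, r.length = 4) → ∀ r ∈ pvPlaceA s i hs g, r.length = 4 := by
  induction hs with
  | nil => intro s i g hg; exact hg
  | cons call rest ih =>
    intro s i g hg
    rw [pvPlaceA]
    exact ih _ _ _ (rows4_step g hg (s + i) call)

lemma pvEntry_step (g : List (List (Option (List (String × String)))))
    (hg : ∀ r ∈ g, r.length = 4) (a j : Nat) (v : List (String × String)) :
    pvEntry (if a / 4 < g.length then g.modify (a / 4) (fun r => r.set (a % 4) (some v)) else g) j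
      = if j = a ∧ a / 4 < g.length then some v else pvEntry g j := by
  by_cases hg4 : a / 4 < g.length
  · rw [if_pos hg4]
    unfold pvEntry
    by_cases hrow : j / 4 = a / 4
    · have hlt : j / 4 < g.length := hrow ▸ hg4
      have hlt' : j / 4 < (g.modify (a / 4) (fun r => r.set (a % 4) (some v))).length := by
        simpa [List.length_modify] using hlt
      rw [List.getD_eq_getElem _ _ hlt', List.getD_eq_getElem _ _ hlt]
      rw [List.getElem_modify, if_pos hrow.symm]
      have hrl : (g[j / 4]'hlt).length = 4 := hg _ (List.getElem_mem hlt)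
      by_cases hcol : j % 4 = a % 4
      · have hset : a % 4 < (g[j / 4]'hlt).length := by rw [hrl]; omega
        rw [hcol]
        rw [List.getD_eq_getElem _ _ (by simpa using hset), List.getElem_set_self]
        rw [if_pos ⟨by omega, hg4⟩]
      · rw [List.getD_eq_getElem?_getD, List.getD_eq_getElem?_getD,
          List.getElem?_set_ne (fun h => hcol (by omega))]
        rw [if_neg (by intro hja; exact hcol (by omega))]
    · have : j ≠ a := fun hja => hrow (by omega)
      rw [if_neg (by intro hja; exact this hja.1)]
      have hmod : (g.modify (a / 4) (fun r => r.set (a % 4) (some v))).getD (j / 4)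
          ([] : List (Option (List (String × String)))) = g.getD (j / 4) [] := by
        rw [List.getD_eq_getElem?_getD, List.getD_eq_getElem?_getD,
          List.getElem?_modify]
        simp [show ¬ (a / 4 = j / 4) from fun h => hrow h.symm]
      rw [hmod]
  · rw [if_neg hg4, if_neg (by intro h; exact hg4 h.2)]

lemma place_entry (hs : List (List (String × String))) :
    ∀ (s i j : Nat) (g : List (List (Option (List (String × String))))),
      (∀ r ∈ g, r.length = 4) →
      pvEntry (pvPlaceA s i hs g) j =
        if s + i ≤ j ∧ j < s + i + hs.length ∧ j / 4 < g.length
        then some (hs.getD (j - (s + i)) [])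
        else pvEntry g j := by
  induction hs with
  | nil =>
    intro s i j g hg
    rw [pvPlaceA, if_neg (by simp; omega)]
  | cons call rest ih =>
    intro s i j g hg
    rw [pvPlaceA]
    rw [ih s (i + 1) j _ (rows4_step g hg (s + i) call)]
    rw [len_step g (s + i) call]
    rw [pvEntry_step g hg (s + i) j call]
    by_cases h1 : s + (i + 1) ≤ j ∧ j < s + (i + 1) + rest.length ∧ j / 4 < g.length
    · rw [if_pos h1, if_pos (by simp; omega)]
      have hj : j - (s + i) = (j - (s + (i + 1))) + 1 := by omega
      rw [hj, List.getD_cons_succ]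
    · rw [if_neg h1]
      by_cases h2 : j = s + i ∧ (s + i) / 4 < g.length
      · rw [if_pos h2]
        rw [if_pos (by simp; omega)]
        have hj : j - (s + i) = 0 := by omega
        rw [hj, List.getD_cons_zero]
      · rw [if_neg h2, if_neg (by simp only [List.length_cons]; omega)]

lemma getD_none4 (k : Nat) :
    (([none, none, none, none] : List (Option (List (String × String)))).getD k none) = none := by
  match k with
  | 0 | 1 | 2 | 3 => rfl
  | (n + 4) => rfl

lemma entry_grid0 (N j : Nat) :
    pvEntry (List.replicate N ([none, none, none, none] :
      List (Option (List (String × String))))) j = none := by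
  unfold pvEntry
  rcases lt_or_ge (j / 4) N with h | h
  · have hlt : j / 4 < (List.replicate N ([none, none, none, none] :
        List (Option (List (String × String))))).length := by simpa using h
    rw [List.getD_eq_getElem _ _ hlt, List.getElem_replicate]
    exact getD_none4 _
  · have hge : (List.replicate N ([none, none, none, none] :
        List (Option (List (String × String))))).length ≤ j / 4 := by simpa using h
    rw [List.getD_eq_default _ _ hge]
    rfl

lemma chunk_eq (padded : List (Option (List (String × String)))) (r : Nat) :
    PySem.List.slice padded (some ((r * 4 : Nat) : Int)) (some ((r * 4 + 4 : Nat) : Int))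
      = (padded.drop (r * 4)).take 4 := by
  rw [PySem.List.slice_natCast]
  congr 1
  omega

lemma rowB_length (padded : List (Option (List (String × String)))) (r : Nat) :
    (pvRowB padded r).length = 4 := by
  unfold pvRowB
  rw [chunk_eq]
  simp only [List.length_append, List.length_replicate, List.length_take, List.length_drop]
  omega

lemma rowB_getD (padded : List (Option (List (String × String)))) (r c : Nat) (hc : c < 4) :
    (pvRowB padded r).getD c none = padded.getD (r * 4 + c) none := by
  unfold pvRowB
  rw [chunk_eq]
  have hlen : ((padded.drop (r * 4)).take 4).length = min 4 (padded.length - r * 4) := by simp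
  rw [List.getD_eq_getElem?_getD, List.getD_eq_getElem?_getD]
  by_cases h : c < ((padded.drop (r * 4)).take 4).length
  · rw [List.getElem?_append_left h]
    rw [List.getElem?_take_of_lt (by omega : c < 4), List.getElem?_drop]
  · rw [List.getElem?_append_right (Nat.le_of_not_lt h), List.getElem?_replicate]
    rw [if_pos (by omega : c - ((padded.drop (r * 4)).take 4).length < 4 - ((padded.drop (r * 4)).take 4).length)]
    rw [List.getElem?_eq_none (by omega : padded.length ≤ r * 4 + c)]
    rfl

lemma padded_getD (s : Nat) (history : List (List (String × String))) (j : Nat) :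
    (List.replicate s (none : Option (List (String × String))) ++ history.map some).getD j none
      = if s ≤ j ∧ j < s + history.length then some (history.getD (j - s) []) else none := by
  rw [List.getD_eq_getElem?_getD]
  by_cases h1 : j < s
  · rw [List.getElem?_append_left (by simpa using h1), List.getElem?_replicate, if_pos h1,
      if_neg (by omega)]
    rfl
  · rw [List.getElem?_append_right (by simpa using Nat.le_of_not_lt h1)]
    by_cases h2 : j < s + history.length
    · have hlt : j - s < history.length := by omega
      rw [if_pos ⟨Nat.le_of_not_lt h1, h2⟩]
      rw [List.getElem?_eq_getElem (by simpa [List.length_replicate] using hlt)]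
      simp [List.getD_eq_getElem?_getD, List.getElem?_eq_getElem hlt]
    · rw [if_neg (by omega), List.getElem?_eq_none (by simp [List.length_replicate]; omega)]
      rfl

lemma gridA_eq_gridB (s : Nat) (history : List (List (String × String))) :
    pvGridA s history = pvGridB s history := by
  simp only [pvGridA, pvGridB, PySem.List.foldl_append_singleton_eq_map,
    List.length_append, List.length_replicate, List.length_map, List.nil_append,
    List.map_const', List.length_range]
  have hlenA : (pvPlaceA s 0 history
      (List.replicate (max 1 ((s + history.length + 3) / 4)) [none, none, none, none])).length
      = max 1 ((s + history.length + 3) / 4) := by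
    rw [pvPlaceA_length, List.length_replicate]
  have hrows0 : ∀ r ∈ (List.replicate (max 1 ((s + history.length + 3) / 4))
      ([none, none, none, none] : List (Option (List (String × String))))), r.length = 4 := by
    intro r hr
    rw [List.eq_of_mem_replicate hr]
    rfl
  have hrowsA := pvPlaceA_rows4 history s 0 _ hrows0
  apply List.ext_getElem
  · simp [hlenA]
  · intro r h1 h2
    rw [List.getElem_map, List.getElem_range]
    apply List.ext_getElem
    · rw [rowB_length, hrowsA _ (List.getElem_mem h1)]
    · intro c hc1 hc2
      have hc4 : c < 4 := by rwa [hrowsA _ (List.getElem_mem h1)] at hc1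
      have hrN : r < max 1 ((s + history.length + 3) / 4) := by rwa [hlenA] at h1
      have hdiv : (r * 4 + c) / 4 = r := by omega
      have hmod : (r * 4 + c) % 4 = c := by omega
      have hB : (pvRowB (List.replicate s none ++ history.map some) r)[c]'hc2
          = (List.replicate s (none : Option (List (String × String)))
              ++ history.map some).getD (r * 4 + c) none := by
        rw [← List.getD_eq_getElem _ none hc2, rowB_getD _ _ _ hc4]
      rw [hB, padded_getD]
      have hA : ((pvPlaceA s 0 history (List.replicate (max 1 ((s + history.length + 3) / 4))
            [none, none, none, none]))[r]'h1)[c]'hc1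
          = pvEntry (pvPlaceA s 0 history (List.replicate (max 1 ((s + history.length + 3) / 4))
            [none, none, none, none])) (r * 4 + c) := by
        unfold pvEntry
        rw [hdiv, hmod]
        rw [List.getD_eq_getElem _ _ h1, List.getD_eq_getElem _ _ hc1]
      rw [hA, place_entry history s 0 (r * 4 + c) _ hrows0]
      rw [List.length_replicate]
      by_cases hcond : s ≤ r * 4 + c ∧ r * 4 + c < s + history.length
      · rw [if_pos (by omega), if_pos hcond]
        simp
      · rw [if_neg (by omega), if_neg hcond, entry_grid0]

-- ===== VERDICT (by name: the statement is the Claim_ definition above) =====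
theorem create_auction_grid_spec : Claim_equal_create_auction_grid := by
  intro dealer_seat history _ hpre
  unfold Spec_create_auction_grid
  unfold Pre_create_auction_grid at hpre
  fin_cases hpre <;>
    simp only [create_auction_grid, create_auction_grid_alt, PySem.List.index?_eq_idxOf?,
      List.idxOf?] <;>
    · show pvGridA _ history = pvGridB _ history
      exact gridA_eq_gridB _ history
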